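-- pv_equiv track=rewrite | github.com/savizronen/Investing | main.py | flatten_watchlist
-- ===== SOURCE A (Python) =====
-- def flatten_watchlist(watchlist: dict[str, list[str]]) -> tuple[list[str], dict[str, str]]:
--     symbols: list[str] = []
--     symbol_to_group: dict[str, str] = {}
--     for group, group_symbols in watchlist.items():
--         for symbol in group_symbols:
--             symbol = symbol.strip().upper()
--             if not symbol:
--                 continue
--             if symbol in symbol_to_group:
--                 continue
--             symbol_to_group[symbol] = group
--             symbols.append(symbol)
--     return symbols, symbol_to_group
-- ===== SOURCE B (Python) =====
-- def flatten_watchlist(watchlist: dict[str, list[str]]) -> tuple[list[str], dict[str, str]]: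
--     # Staged passes instead of one stateful loop:
--     # (1) flatten to (group, normalized-symbol) pairs,
--     # (2) ordered dedup of the non-empty symbols,
--     # (3) first-occurrence group map built by overwriting over the REVERSED
--     #     flat list (last write in reverse order = first occurrence overall),
--     #     then re-keyed in symbol order.
--     flat = [(group, symbol.strip().upper())
--             for group, group_symbols in watchlist.items()
--             for symbol in group_symbols]
--     first = {symbol: group for group, symbol in reversed(flat)}
--     symbols = list(dict.fromkeys(symbol for _, symbol in flat if symbol))
--     symbol_to_group = {symbol: first[symbol] for symbol in symbols}
--     return symbols, symbol_to_group
-- ===== Notes on version B (the rewrite author's own statement) =====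
-- stated objective: alternative
-- what changed: B replaces A's single stateful nested loop (parallel list + dict guarded by membership tests) by three staged passes over a flattened (group, normalized-symbol) pair list: an ordered dedup of the non-empty symbols, a first-occurrence group map built by plain overwriting over the REVERSED pair list (no membership test), and a final re-keying in symbol order.
import Mathlib
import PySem

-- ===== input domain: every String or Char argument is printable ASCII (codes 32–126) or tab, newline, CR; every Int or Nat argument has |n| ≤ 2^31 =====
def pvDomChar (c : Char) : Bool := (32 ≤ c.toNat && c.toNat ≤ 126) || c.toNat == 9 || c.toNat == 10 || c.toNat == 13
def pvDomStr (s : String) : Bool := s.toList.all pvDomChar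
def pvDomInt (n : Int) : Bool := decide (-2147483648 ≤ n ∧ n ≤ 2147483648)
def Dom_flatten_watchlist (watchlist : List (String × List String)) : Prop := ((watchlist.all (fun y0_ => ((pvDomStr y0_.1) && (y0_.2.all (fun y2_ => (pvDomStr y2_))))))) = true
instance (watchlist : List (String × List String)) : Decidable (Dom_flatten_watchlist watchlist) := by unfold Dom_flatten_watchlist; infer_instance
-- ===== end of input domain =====

-- B re-decomposes the work into staged passes: flatten to (group, normalized-symbol)
-- pairs, ordered-dedup the non-empty symbols, then map each symbol to the group of
-- its first occurrence by searching the flat list — no incremental dict/list state.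


-- ===== PORT A =====
-- A's inner loop body: state is the pair (symbols list, symbol→group dict)
def fwA_step (group : String) (st : List String × PySem.Dict String String) (sym : String) :
    List String × PySem.Dict String String :=
  let s := PySem.Str.upper (PySem.Str.strip sym)
  if s = "" then st
  else if st.2.contains s then st
  else (st.1 ++ [s], st.2.insert s group)

def flatten_watchlist (watchlist : List (String × List String)) :
    List String × (List (String × String)) :=
  let st := watchlist.foldl
    (fun st p => p.2.foldl (fwA_step p.1) st)
    ([], PySem.Dict.empty)
  (st.1, st.2.items)

-- ===== PORT B =====
def flatten_watchlist_alt (watchlist : List (String × List String)) :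
    List String × (List (String × String)) :=
  let flat := watchlist.flatMap
    (fun p => p.2.map (fun sym => (p.1, PySem.Str.upper (PySem.Str.strip sym))))
  let first := flat.reverse.foldl (fun d q => d.insert q.2 q.1) PySem.Dict.empty
  let symbols := PySem.List.dedup ((flat.map (fun q => q.2)).filter (fun s => !(s == "")))
  -- first[symbol]: every symbol comes from flat, so the lookup always succeeds;
  -- the .getD "" default is unreachable (it mirrors no Python branch)
  let m := symbols.map (fun s => (s, (first.get? s).getD ""))
  (symbols, m)

-- ===== PRECONDITION & SPEC =====
def Spec_flatten_watchlist (watchlist : List (String × List String)) (out : List String × (List (String × String))) : Prop := out = flatten_watchlist_alt watchlist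
instance (watchlist : List (String × List String)) (out : List String × (List (String × String))) : Decidable (Spec_flatten_watchlist watchlist out) := by unfold Spec_flatten_watchlist; infer_instance

-- ===== CLAIM (what is proved, stated in full; the proofs are below) =====
def Claim_equal_flatten_watchlist : Prop := ∀ (watchlist : List (String × List String)), Dom_flatten_watchlist watchlist → Spec_flatten_watchlist watchlist (flatten_watchlist watchlist)

-- ===== LEMMAS AND PROOFS =====

-- A's loop body on an already-normalized (group, symbol) pair
def fwPair (st : List String × PySem.Dict String String) (q : String × String) :
    List String × PySem.Dict String String :=
  if q.2 = "" then st
  else if st.2.contains q.2 then st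
  else (st.1 ++ [q.2], st.2.insert q.2 q.1)

-- the dict component of that loop on its own
def fwD (d : PySem.Dict String String) (q : String × String) : PySem.Dict String String :=
  if q.2 = "" then d
  else if d.contains q.2 then d
  else d.insert q.2 q.1

theorem foldl_flatMap_eq {α β γ : Type} (l : List α) (g : α → List β)
    (f : γ → β → γ) (init : γ) :
    l.foldl (fun st p => (g p).foldl f st) init = (l.flatMap g).foldl f init := by
  induction l generalizing init with
  | nil => rfl
  | cons p t ih => simp [List.flatMap_cons, List.foldl_append, ih]

-- A's pair-state fold, started from (d.keys, d), stays of the form (keys, dict)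
theorem fwPair_fold_eq (l : List (String × String)) (d : PySem.Dict String String) :
    l.foldl fwPair (d.keys, d) = ((l.foldl fwD d).keys, l.foldl fwD d) := by
  induction l generalizing d with
  | nil => rfl
  | cons q t ih =>
    simp only [List.foldl_cons]
    have hstep : fwPair (d.keys, d) q = ((fwD d q).keys, fwD d q) := by
      unfold fwPair fwD
      by_cases hs : q.2 = ""
      · simp [hs]
      · by_cases hc : d.contains q.2 = true
        · simp [hs, hc]
        · have hc' : d.contains q.2 = false := by simpa using hc
          simp only [hs, if_false, hc', Bool.false_eq_true]
          exact Prod.ext (PySem.Dict.keys_insert_of_not_contains (v := q.1) (h := hc')).symm rfl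
    rw [hstep]; exact ih (fwD d q)

-- overwriting over the reversed pair list looks up the FIRST occurrence's group
theorem revfold_get? (l : List (String × String)) (s : String) :
    (l.reverse.foldl (fun d q => d.insert q.2 q.1)
        (PySem.Dict.empty : PySem.Dict String String)).get? s
      = (l.find? (fun q => q.2 == s)).map (fun q => q.1) := by
  induction l with
  | nil => simp [PySem.Dict.get?_empty]
  | cons q t ih =>
    rw [List.reverse_cons, List.foldl_append, List.foldl_cons, List.foldl_nil,
      PySem.Dict.get?_insert, List.find?_cons]
    by_cases h : q.2 = s
    · simp [h]
    · simp only [show (q.2 == s) = false from by simpa using h, if_neg (Ne.symm h)]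
      exact ih

-- the items of the dict fold are exactly B's staged computation, relative to d
theorem fwD_items (l : List (String × String)) (d : PySem.Dict String String)
    (hnd : d.keys.Nodup) :
    (l.foldl fwD d).items = d.items ++
      ((PySem.List.dedup ((l.map (fun q => q.2)).filter (fun s => !(s == "")))).filter
          (fun s => !(d.contains s))).map
        (fun s => (s, ((l.find? (fun q => q.2 == s)).map (fun q => q.1)).getD "")) := by
  induction l generalizing d with
  | nil => simp [PySem.List.dedup]
  | cons q t ih =>
    obtain ⟨g, s⟩ := q
    simp only [List.foldl_cons, List.map_cons]
    by_cases hs : s = ""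
    · -- empty symbol: skipped by A, dropped by B's filter
      subst hs
      have h1 : fwD d (g, "") = d := by simp [fwD]
      rw [h1, ih d hnd, List.filter_cons_of_neg (by simp)]
      refine congrArg (d.items ++ ·) (List.map_congr_left ?_)
      intro a ha
      have ha' := (List.mem_filter.mp ha).1
      rw [PySem.List.dedup, PySem.Set.mem_ofList] at ha'
      have hane : ("" == a) = false := by
        simp only [beq_eq_false_iff_ne]
        rintro rfl
        simpa using (List.mem_filter.mp ha').2
      simp [hane]
    · rw [List.filter_cons_of_pos (by simp [hs])]
      simp only [PySem.List.dedup, PySem.Set.ofList_cons]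
      by_cases hc : d.contains s = true
      · -- already recorded: skipped by A, dropped by B's not-contains filter
        have h1 : fwD d (g, s) = d := by simp [fwD, hs, hc]
        rw [h1, ih d hnd, List.filter_cons_of_neg (by simp [hc])]
        refine congrArg (d.items ++ ·) ?_
        have hfeq :
            List.filter (fun x => !(d.contains x))
                (PySem.Set.discard (PySem.Set.ofList (List.filter (fun x => !(x == ""))
                  (t.map (fun q => q.2)))) s)
              = List.filter (fun x => !(d.contains x))
                (PySem.Set.ofList (List.filter (fun x => !(x == "")) (t.map (fun q => q.2)))) := by
          unfold PySem.Set.discard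
          rw [List.filter_filter]
          refine List.filter_congr ?_
          intro a _
          by_cases has : a = s
          · subst has; simp [hc]
          · simp [has]
        rw [hfeq]
        refine List.map_congr_left ?_
        intro a ha
        have hcontains := (List.mem_filter.mp ha).2
        have hane : (s == a) = false := by
          simp only [beq_eq_false_iff_ne]
          rintro rfl
          simp [hc] at hcontains
        simp [hane]
      · -- new symbol: A appends (s, g); B's head of the dedup list pairs with g too
        have hc' : d.contains s = false := by simpa using hc
        have h1 : fwD d (g, s) = d.insert s g := by simp [fwD, hs, hc']
        have hnd' : (d.insert s g).keys.Nodup := PySem.Dict.nodup_keys_insert d s g hnd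
        rw [h1, ih (d.insert s g) hnd',
          PySem.Dict.items_insert_of_not_contains (h := hc'),
          List.filter_cons_of_pos (by simp [hc'])]
        rw [List.append_assoc]
        refine congrArg (d.items ++ ·) ?_
        simp only [List.map_cons, List.singleton_append]
        have hhead : ((((g, s) :: t).find? (fun q => q.2 == s)).map (fun q => q.1)).getD "" = g := by
          simp
        rw [hhead]
        refine congrArg ((s, g) :: ·) ?_
        have hfeq :
            List.filter (fun x => !((d.insert s g).contains x))
                (PySem.List.dedup (List.filter (fun x => !(x == "")) (t.map (fun q => q.2))))
              = List.filter (fun x => !(d.contains x))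
                (PySem.Set.discard (PySem.Set.ofList (List.filter (fun x => !(x == ""))
                  (t.map (fun q => q.2)))) s) := by
          unfold PySem.List.dedup PySem.Set.discard
          rw [List.filter_filter]
          refine List.filter_congr ?_
          intro a _
          rw [PySem.Dict.contains_insert]
          by_cases has : a = s
          · subst has; simp
          · simp [show (a == s) = false from by simpa using has]
        rw [hfeq]
        refine List.map_congr_left ?_
        intro a ha
        have hmem := List.mem_filter.mp ha
        have hane : (s == a) = false := by
          simp only [beq_eq_false_iff_ne]
          rintro rfl
          have := hmem.1
          unfold PySem.Set.discard at this
          simpa using (List.mem_filter.mp this).2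
        simp [hane]

-- ===== VERDICT (by name: the statement is the Claim_ definition above) =====
theorem flatten_watchlist_spec : Claim_equal_flatten_watchlist := by
  intro wl _
  unfold Spec_flatten_watchlist flatten_watchlist flatten_watchlist_alt
  -- A's nested fold is a single fold over the flattened, normalized pair list
  have hinner : ∀ (st : List String × PySem.Dict String String) (p : String × List String),
      p.2.foldl (fwA_step p.1) st
        = (p.2.map (fun sym => (p.1, PySem.Str.upper (PySem.Str.strip sym)))).foldl fwPair st := by
    intro st p
    rw [List.foldl_map]
    rfl
  have hflat := foldl_flatMap_eq wl
    (fun p => p.2.map (fun sym => (p.1, PySem.Str.upper (PySem.Str.strip sym))))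
    fwPair (([] : List String), (PySem.Dict.empty : PySem.Dict String String))
  set flat := wl.flatMap
    (fun p => p.2.map (fun sym => (p.1, PySem.Str.upper (PySem.Str.strip sym)))) with hflatdef
  have h0 : wl.foldl (fun st p => p.2.foldl (fwA_step p.1) st)
      (([] : List String), (PySem.Dict.empty : PySem.Dict String String))
      = flat.foldl fwPair ([], PySem.Dict.empty) := by
    rw [← hflat]
    have hfun : (fun (st : List String × PySem.Dict String String) (p : String × List String) =>
        p.2.foldl (fwA_step p.1) st)
        = (fun st p => (p.2.map (fun sym => (p.1, PySem.Str.upper (PySem.Str.strip sym)))).foldl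
            fwPair st) :=
      funext fun st => funext fun p => hinner st p
    rw [hfun]
  have hpair : flat.foldl fwPair (([] : List String), PySem.Dict.empty)
      = ((flat.foldl fwD PySem.Dict.empty).keys, flat.foldl fwD PySem.Dict.empty) :=
    fwPair_fold_eq flat PySem.Dict.empty
  have hitems := fwD_items flat PySem.Dict.empty (by simp [PySem.Dict.keys, PySem.Dict.empty])
  have hnofilter :
      List.filter (fun s => !((PySem.Dict.empty : PySem.Dict String String).contains s))
        (PySem.List.dedup ((flat.map (fun q => q.2)).filter (fun s => !(s == ""))))
      = PySem.List.dedup ((flat.map (fun q => q.2)).filter (fun s => !(s == ""))) := by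
    refine List.filter_eq_self.mpr ?_
    intro a _
    simp [PySem.Dict.contains_empty]
  rw [hnofilter] at hitems
  have hempty_items : (PySem.Dict.empty : PySem.Dict String String).items = [] := rfl
  rw [hempty_items, List.nil_append] at hitems
  have hmapeq : (fun s => (s, ((flat.reverse.foldl (fun d q => d.insert q.2 q.1)
        (PySem.Dict.empty : PySem.Dict String String)).get? s).getD ""))
      = (fun s => (s, ((flat.find? (fun q => q.2 == s)).map (fun q => q.1)).getD "")) :=
    funext fun s => by rw [revfold_get? flat s]
  rw [h0, hpair]
  refine Prod.ext ?_ ?_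
  · -- keys of the fold = B's symbol list (keys are items.map fst)
    show (flat.foldl fwD PySem.Dict.empty).keys = _
    simp only [PySem.Dict.keys, hitems, List.map_map]
    have hid : ((fun (x : String × String) => x.1) ∘
        (fun s => (s, ((flat.find? (fun q => q.2 == s)).map (fun q => q.1)).getD ""))) = id := rfl
    rw [hid, List.map_id]
  · show (flat.foldl fwD PySem.Dict.empty).items
        = (PySem.List.dedup ((flat.map (fun q => q.2)).filter (fun s => !(s == "")))).map
            (fun s => (s, ((flat.reverse.foldl (fun d q => d.insert q.2 q.1)
              (PySem.Dict.empty : PySem.Dict String String)).get? s).getD ""))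
    rw [hitems, hmapeq]
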